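-- pv_equiv track=rewrite | github.com/anjani-dhrangadhariya/distant-PICO | CandidateGeneration/LabelModelTrain/train_label_model.py | getLFs
-- ===== SOURCE A (Python) =====
-- def getLFs(partition:list, umls_d:dict, seed_len:int):
--
--     all_lfs_combined = []
--
--     for lf in partition: # for each lf in a partition
--
--         combine_here = [-1] *seed_len
--
--         for sab in lf:
--             new_a = umls_d[sab]
--             old_a = combine_here
--             temp_a = []
--             for o_a, n_a in zip(old_a, new_a):
--                 replace_a = max( o_a, n_a )
--                 temp_a.append( replace_a )
--
--             combine_here = temp_a
--
--         all_lfs_combined.append( combine_here )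
--
--     return all_lfs_combined
-- ===== SOURCE B (Python) =====
-- def getLFs(partition: list, umls_d: dict, seed_len: int):
--     out = []
--     for lf in partition:
--         arrays = [[-1] * seed_len] + [umls_d[sab] for sab in lf]
--         out.append([max(col) for col in zip(*arrays)])
--     return out
-- ===== Notes on version B (the rewrite author's own statement) =====
-- stated objective: simpler
-- what changed: Replaces the sequential pairwise zip-max fold (which rebuilds an intermediate list per sab) with one column-wise transpose-and-max pass over the baseline row plus all looked-up arrays.
import Mathlib
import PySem

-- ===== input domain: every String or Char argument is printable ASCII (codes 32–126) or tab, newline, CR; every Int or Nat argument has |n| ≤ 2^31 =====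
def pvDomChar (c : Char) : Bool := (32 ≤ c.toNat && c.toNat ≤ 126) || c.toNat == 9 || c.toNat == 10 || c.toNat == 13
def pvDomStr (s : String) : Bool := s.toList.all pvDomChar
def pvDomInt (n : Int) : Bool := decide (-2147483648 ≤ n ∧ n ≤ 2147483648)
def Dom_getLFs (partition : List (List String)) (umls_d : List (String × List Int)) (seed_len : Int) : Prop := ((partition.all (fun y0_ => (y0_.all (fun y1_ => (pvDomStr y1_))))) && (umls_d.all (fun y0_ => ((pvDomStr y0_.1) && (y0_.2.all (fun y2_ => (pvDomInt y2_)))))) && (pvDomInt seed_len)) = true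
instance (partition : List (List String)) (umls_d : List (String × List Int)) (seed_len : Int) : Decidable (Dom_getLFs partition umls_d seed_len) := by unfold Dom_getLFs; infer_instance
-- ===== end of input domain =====

-- B replaces A's sequential pairwise zip-max fold per lf by one column-wise
-- transpose-and-max pass over the baseline row plus all looked-up arrays (simpler decomposition).


-- umls_d[sab]: Python dict lookup (a dict built from the association list: a later duplicate
-- key overwrites an earlier one, hence last match); compared via toList so the kernel can
-- evaluate it; inside Pre_ every key is present, so the getD [] default is never used.
def pyDictGet (umls_d : List (String × List Int)) (sab : String) : List Int :=
  (umls_d.foldl (fun acc kv => if kv.1.toList == sab.toList then some kv.2 else acc) none).getD []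

-- ===== PORT A =====
def getLFs (partition : List (List String)) (umls_d : List (String × List Int)) (seed_len : Int) : List (List Int) :=
  partition.foldl (fun all_lfs_combined lf =>
    let combine_here :=
      lf.foldl (fun combine_here sab =>
        let new_a := pyDictGet umls_d sab
        (combine_here.zip new_a).map (fun p => max p.1 p.2))
        (List.replicate seed_len.toNat (-1))
    all_lfs_combined ++ [combine_here]) []

-- ===== PORT B =====
-- [max(col) for col in zip(*arrays)] with arrays = baseline :: rest: zip stops at the
-- shortest array; recursion is on the baseline, checking the rest are nonempty columnwise
def colMax : List Int → List (List Int) → List Int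
  | [], _ => []
  | x :: xs, rest =>
    if rest.all (fun l => !l.isEmpty) then
      (rest.foldl (fun m l => max m (l.headD 0)) x) :: colMax xs (rest.map List.tail)
    else []

def getLFs_alt (partition : List (List String)) (umls_d : List (String × List Int)) (seed_len : Int) : List (List Int) :=
  partition.map (fun lf =>
    colMax (List.replicate seed_len.toNat (-1))
      (lf.map (fun sab => pyDictGet umls_d sab)))

-- ===== PRECONDITION & SPEC =====
-- Pre_ excludes exactly the inputs where some sab in some lf is not a key of umls_d:
-- there Python A raises KeyError (umls_d[sab]).
def Pre_getLFs (partition : List (List String)) (umls_d : List (String × List Int)) (seed_len : Int) : Prop :=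
  (partition.all (fun lf => lf.all (fun sab => umls_d.any (fun kv => kv.1.toList == sab.toList)))) = true
instance (partition : List (List String)) (umls_d : List (String × List Int)) (seed_len : Int) : Decidable (Pre_getLFs partition umls_d seed_len) := by unfold Pre_getLFs; infer_instance

def pvWitness_getLFs : List (List String) × (List (String × List Int)) × Int :=
  ([["a"], ["a", "b"], []], [("a", [3, -2, 0]), ("b", [1, 5])], 3)

def Spec_getLFs (partition : List (List String)) (umls_d : List (String × List Int)) (seed_len : Int) (out : List (List Int)) : Prop := out = getLFs_alt partition umls_d seed_len
instance (partition : List (List String)) (umls_d : List (String × List Int)) (seed_len : Int) (out : List (List Int)) : Decidable (Spec_getLFs partition umls_d seed_len out) := by unfold Spec_getLFs; infer_instance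

-- ===== CLAIM (what is proved, stated in full; the proofs are below) =====
def Claim_equal_getLFs : Prop := ∀ (partition : List (List String)) (umls_d : List (String × List Int)) (seed_len : Int), Dom_getLFs partition umls_d seed_len → Pre_getLFs partition umls_d seed_len → Spec_getLFs partition umls_d seed_len (getLFs partition umls_d seed_len)

-- ===== LEMMAS AND PROOFS =====

def pvStep (c a : List Int) : List Int := (c.zip a).map (fun p => max p.1 p.2)

theorem colMax_nil (c : List Int) : colMax c [] = c := by
  induction c with
  | nil => rfl
  | cons x xs ih => simp [colMax, ih]

theorem colMax_step (c : List Int) : ∀ (a : List Int) (rest : List (List Int)),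
    colMax (pvStep c a) rest = colMax c (a :: rest) := by
  induction c with
  | nil => intro a rest; simp [pvStep, colMax]
  | cons x xs ih =>
    intro a rest
    cases a with
    | nil => simp [pvStep, colMax]
    | cons y ys =>
      have h : pvStep (x :: xs) (y :: ys) = max x y :: pvStep xs ys := rfl
      rw [h]
      simp only [colMax, List.all_cons, List.isEmpty_cons, Bool.not_false, Bool.true_and,
        List.foldl_cons, List.headD_cons, List.map_cons, List.tail_cons]
      split
      · rw [ih ys (rest.map List.tail)]
      · rfl

theorem foldl_step_eq_colMax (g : String → List Int) (lf : List String) :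
    ∀ (c : List Int),
    lf.foldl (fun combine sab => pvStep combine (g sab)) c = colMax c (lf.map g) := by
  induction lf with
  | nil => intro c; simp [colMax_nil]
  | cons sab lf ih =>
    intro c
    simp only [List.foldl_cons, List.map_cons]
    rw [ih (pvStep c (g sab)), colMax_step]

theorem foldl_append_one {α β : Type} (h : α → β) (l : List α) :
    ∀ (acc : List β), l.foldl (fun acc x => acc ++ [h x]) acc = acc ++ l.map h := by
  induction l with
  | nil => intro acc; simp
  | cons x l ih => intro acc; simp [ih]

-- ===== VERDICT (by name: the statement is the Claim_ definition above) =====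
theorem getLFs_spec : Claim_equal_getLFs := by
  intro partition umls_d seed_len _ _
  unfold Spec_getLFs getLFs getLFs_alt
  rw [foldl_append_one]
  simp only [List.nil_append]
  apply List.map_congr_left
  intro lf _
  exact foldl_step_eq_colMax _ lf _
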